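-- pv_equiv track=rewrite | github.com/mfeurer/pc_smac | pc_smac/pc_smbo/select_configuration.py | _get_values
-- ===== SOURCE A (Python) =====
-- def _get_values(config_dict, pipeline_steps):
--     value_dict = {}
--     for step_name in pipeline_steps:
--         for hp_name in config_dict:
--             splt_hp_name = hp_name.split(":")
--             if splt_hp_name[0] == step_name:
--                 value_dict[hp_name] = config_dict[hp_name]
--     return value_dict
-- ===== SOURCE B (Python) =====
-- def _get_values(config_dict, pipeline_steps):
--     # Index the hyperparameters by their step prefix in ONE pass, then emit
--     # each requested step's bucket; no per-step rescan of config_dict.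
--     buckets = {}
--     for hp_name in config_dict:
--         buckets.setdefault(hp_name.split(":")[0], []).append(hp_name)
--     value_dict = {}
--     for step_name in pipeline_steps:
--         for hp_name in buckets.get(step_name, []):
--             value_dict[hp_name] = config_dict[hp_name]
--     return value_dict
-- ===== Notes on version B (the rewrite author's own statement) =====
-- stated objective: faster
-- what changed: B builds a prefix->keys index of config_dict in one pass and then emits each pipeline step's bucket, replacing A's nested steps-by-hyperparameters rescan.
import Mathlib
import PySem

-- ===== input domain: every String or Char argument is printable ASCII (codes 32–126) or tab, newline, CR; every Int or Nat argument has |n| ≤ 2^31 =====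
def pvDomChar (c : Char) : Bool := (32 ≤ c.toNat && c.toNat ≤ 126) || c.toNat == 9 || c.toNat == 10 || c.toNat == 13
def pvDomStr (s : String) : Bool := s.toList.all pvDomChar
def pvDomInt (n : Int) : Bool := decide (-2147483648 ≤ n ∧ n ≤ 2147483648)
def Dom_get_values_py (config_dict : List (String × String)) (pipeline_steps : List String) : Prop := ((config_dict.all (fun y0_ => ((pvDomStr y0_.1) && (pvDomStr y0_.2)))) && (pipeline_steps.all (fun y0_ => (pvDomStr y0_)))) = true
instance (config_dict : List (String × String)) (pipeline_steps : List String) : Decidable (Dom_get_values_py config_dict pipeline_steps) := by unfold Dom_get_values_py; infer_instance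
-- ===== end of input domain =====

-- B replaces A's steps×config nested scan by a one-pass prefix→keys index followed by
-- per-step bucket emission (same return value; objective: faster on many steps).


-- hp_name.split(":")[0]  (split? is `some` since ":" ≠ ""; the result is never empty, so [0] never raises)
def pvPrefix (k : String) : String := ((PySem.Str.split? k ":").getD []).headD ""

-- config_dict[hp_name]  (only looked up for keys present in config_dict, so the default is never taken)
def pvLook (config_dict : List (String × String)) (k : String) : String :=
  PySem.Dict.getD (PySem.Dict.mk config_dict) k ""

-- ===== PORT A =====
def get_values_py (config_dict : List (String × String)) (pipeline_steps : List String) : List (String × String) :=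
  (pipeline_steps.foldl (fun value_dict step_name =>
      config_dict.foldl (fun value_dict kv =>
          if pvPrefix kv.1 == step_name then value_dict.insert kv.1 (pvLook config_dict kv.1)
          else value_dict)
        value_dict)
    (PySem.Dict.empty : PySem.Dict String String)).items

-- ===== PORT B =====
def get_values_py_alt (config_dict : List (String × String)) (pipeline_steps : List String) : List (String × String) :=
  let buckets : PySem.Dict String (List String) :=
    config_dict.foldl (fun d kv => d.modify (pvPrefix kv.1) [] (· ++ [kv.1])) PySem.Dict.empty
  (pipeline_steps.foldl (fun value_dict step_name =>
      (buckets.getD step_name []).foldl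
        (fun value_dict hp_name => value_dict.insert hp_name (pvLook config_dict hp_name))
        value_dict)
    (PySem.Dict.empty : PySem.Dict String String)).items

-- ===== PRECONDITION & SPEC =====
def Spec_get_values_py (config_dict : List (String × String)) (pipeline_steps : List String) (out : List (String × String)) : Prop := out = get_values_py_alt config_dict pipeline_steps
instance (config_dict : List (String × String)) (pipeline_steps : List String) (out : List (String × String)) : Decidable (Spec_get_values_py config_dict pipeline_steps out) := by unfold Spec_get_values_py; infer_instance

-- ===== CLAIM (what is proved, stated in full; the proofs are below) =====
def Claim_equal_get_values_py : Prop := ∀ (config_dict : List (String × String)) (pipeline_steps : List String), Dom_get_values_py config_dict pipeline_steps → Spec_get_values_py config_dict pipeline_steps (get_values_py config_dict pipeline_steps)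

-- ===== LEMMAS AND PROOFS =====

-- B's bucket for a step is exactly the config keys whose prefix is that step, in config order.
theorem buckets_getD (config_dict : List (String × String)) (step : String) :
    (config_dict.foldl (fun d kv => d.modify (pvPrefix kv.1) [] (· ++ [kv.1]))
        (PySem.Dict.empty : PySem.Dict String (List String))).getD step []
      = ((config_dict.filter (fun kv => pvPrefix kv.1 == step)).map (·.1)) := by
  have h : (config_dict.foldl (fun d kv => d.modify (pvPrefix kv.1) [] (· ++ [kv.1]))
        (PySem.Dict.empty : PySem.Dict String (List String)))
      = ((config_dict.map (fun kv => (pvPrefix kv.1, kv.1))).foldl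
          (fun d p => d.modify p.1 [] (· ++ [p.2])) PySem.Dict.empty) := by
    rw [List.foldl_map]
  rw [h, PySem.Dict.getD_foldl_modify_append, List.filter_map]
  simp [Function.comp_def, List.map_map]

-- one step of A's outer loop = one step of B's outer loop
theorem step_eq (config_dict : List (String × String)) (step : String)
    (value_dict : PySem.Dict String String) :
    config_dict.foldl (fun value_dict kv =>
        if pvPrefix kv.1 == step then value_dict.insert kv.1 (pvLook config_dict kv.1)
        else value_dict) value_dict
      = ((config_dict.foldl (fun d kv => d.modify (pvPrefix kv.1) [] (· ++ [kv.1]))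
            (PySem.Dict.empty : PySem.Dict String (List String))).getD step []).foldl
          (fun value_dict hp_name => value_dict.insert hp_name (pvLook config_dict hp_name))
          value_dict := by
  rw [buckets_getD, List.foldl_map, ← List.foldl_filter]

-- ===== VERDICT (by name: the statement is the Claim_ definition above) =====
theorem get_values_py_spec : Claim_equal_get_values_py := by
  intro config_dict pipeline_steps _
  unfold Spec_get_values_py get_values_py get_values_py_alt
  congr 1
  congr 1
  funext vd step
  exact step_eq config_dict step vd
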